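-- pv_equiv track=rewrite | github.com/Buglish/shadowrun-campaign-map-generator | maps/generators.py | count_walls_around
-- ===== SOURCE A (Python) =====
-- from typing import List, Tuple, Dict
--
-- def count_walls_around(tiles: Dict, x: int, y: int, width: int, height: int, radius: int = 1) -> int:
--     """Count wall tiles in a radius around a position"""
--     count = 0
--     for dy in range(-radius, radius + 1):
--         for dx in range(-radius, radius + 1):
--             if dx == 0 and dy == 0:
--                 continue
--             nx, ny = x + dx, y + dy
--             if 0 <= nx < width and 0 <= ny < height:
--                 if tiles.get((nx, ny)) == 'wall':
--                     count += 1
--             else: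
--                 # Count edges as walls
--                 count += 1
--     return count
-- ===== SOURCE B (Python) =====
-- def count_walls_around(tiles, x, y, width, height, radius=1):
--     """Count wall tiles in a radius around a position (closed-form edge count)."""
--     if radius < 0:
--         return 0
--     xlo, xhi = max(0, x - radius), min(width - 1, x + radius)
--     ylo, yhi = max(0, y - radius), min(height - 1, y + radius)
--     in_bounds = max(0, xhi - xlo + 1) * max(0, yhi - ylo + 1)
--     edges = (2 * radius + 1) ** 2 - in_bounds
--     if not (0 <= x < width and 0 <= y < height):
--         edges -= 1  # the center is never counted, even when out of bounds
--     count = edges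
--     for ny in range(ylo, yhi + 1):
--         for nx in range(xlo, xhi + 1):
--             if nx == x and ny == y:
--                 continue
--             if tiles.get((nx, ny)) == 'wall':
--                 count += 1
--     return count
-- ===== Notes on version B (the rewrite author's own statement) =====
-- stated objective: alternative
-- what changed: B computes the out-of-bounds 'edge' contribution by a closed-form clipped-window formula (with a -1 correction when the center itself is out of bounds) and then loops only over the in-bounds clipped rectangle, instead of A's full (2r+1)^2 window loop with a per-cell bounds test.
import Mathlib
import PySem

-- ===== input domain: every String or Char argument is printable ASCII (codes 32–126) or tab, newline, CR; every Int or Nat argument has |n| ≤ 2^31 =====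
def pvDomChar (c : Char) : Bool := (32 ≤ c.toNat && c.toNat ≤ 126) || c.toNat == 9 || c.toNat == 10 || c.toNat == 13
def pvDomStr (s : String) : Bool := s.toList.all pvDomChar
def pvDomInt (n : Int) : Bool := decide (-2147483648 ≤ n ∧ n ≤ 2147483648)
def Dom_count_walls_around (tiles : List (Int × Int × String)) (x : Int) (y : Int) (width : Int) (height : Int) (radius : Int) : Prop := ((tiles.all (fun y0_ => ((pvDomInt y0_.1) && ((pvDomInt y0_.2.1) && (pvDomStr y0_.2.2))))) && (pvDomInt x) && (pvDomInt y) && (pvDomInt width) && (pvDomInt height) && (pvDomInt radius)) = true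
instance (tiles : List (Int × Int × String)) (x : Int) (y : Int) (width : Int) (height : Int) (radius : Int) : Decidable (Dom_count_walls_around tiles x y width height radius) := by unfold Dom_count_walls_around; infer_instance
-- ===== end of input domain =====

-- B replaces the full-window loop by a closed-form edge count plus a loop over the clipped in-bounds rectangle (alternative decomposition, same results).
-- ===== PORT A =====
def pvGet (tiles : List (Int × Int × String)) (nx ny : Int) : Option String :=
  PySem.Dict.get? (tiles.foldl (fun d e => PySem.Dict.insert d (e.1, e.2.1) e.2.2) PySem.Dict.empty) (nx, ny)

def count_walls_around (tiles : List (Int × Int × String)) (x : Int) (y : Int) (width : Int) (height : Int) (radius : Int) : Int :=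
  (PySem.List.pyRange (-radius) (radius + 1) 1).foldl (fun count dy =>
    (PySem.List.pyRange (-radius) (radius + 1) 1).foldl (fun count dx =>
      if dx = 0 ∧ dy = 0 then count
      else
        let nx := x + dx
        let ny := y + dy
        if 0 ≤ nx ∧ nx < width ∧ 0 ≤ ny ∧ ny < height then
          if pvGet tiles nx ny = some "wall" then count + 1 else count
        else count + 1) count) 0

-- ===== PORT B =====
def count_walls_around_alt (tiles : List (Int × Int × String)) (x : Int) (y : Int) (width : Int) (height : Int) (radius : Int) : Int :=
  if radius < 0 then 0
  else
    let xlo := max 0 (x - radius)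
    let xhi := min (width - 1) (x + radius)
    let ylo := max 0 (y - radius)
    let yhi := min (height - 1) (y + radius)
    let inBounds := max 0 (xhi - xlo + 1) * max 0 (yhi - ylo + 1)
    let edges0 := (2 * radius + 1) ^ 2 - inBounds
    let edges := if ¬(0 ≤ x ∧ x < width ∧ 0 ≤ y ∧ y < height) then edges0 - 1 else edges0
    (PySem.List.pyRange ylo (yhi + 1) 1).foldl (fun count ny =>
      (PySem.List.pyRange xlo (xhi + 1) 1).foldl (fun count nx =>
        if nx = x ∧ ny = y then count
        else if pvGet tiles nx ny = some "wall" then count + 1 else count) count) edges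

-- ===== PRECONDITION & SPEC =====
def Spec_count_walls_around (tiles : List (Int × Int × String)) (x : Int) (y : Int) (width : Int) (height : Int) (radius : Int) (out : Int) : Prop := out = count_walls_around_alt tiles x y width height radius
instance (tiles : List (Int × Int × String)) (x : Int) (y : Int) (width : Int) (height : Int) (radius : Int) (out : Int) : Decidable (Spec_count_walls_around tiles x y width height radius out) := by unfold Spec_count_walls_around; infer_instance

-- ===== CLAIM (what is proved, stated in full; the proofs are below) =====
def Claim_equal_count_walls_around : Prop := ∀ (tiles : List (Int × Int × String)) (x : Int) (y : Int) (width : Int) (height : Int) (radius : Int), Dom_count_walls_around tiles x y width height radius → Spec_count_walls_around tiles x y width height radius (count_walls_around tiles x y width height radius)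

-- ===== LEMMAS AND PROOFS =====


-- general sum lemmas (proof-only helpers)

lemma pv_sum_map_sub (L : List Int) (f g : Int → Int) :
    (L.map (fun n => f n - g n)).sum = (L.map f).sum - (L.map g).sum := by
  induction L with
  | nil => simp
  | cons a t ih => simp [ih]; ring

lemma pv_sum_indicator (L : List Int) (hnd : L.Nodup) (c : Int) (v : Int) :
    (L.map (fun n => if n = c then v else 0)).sum = if c ∈ L then v else 0 := by
  induction L with
  | nil => simp
  | cons a t ih =>
    simp only [List.nodup_cons] at hnd
    by_cases h : a = c
    · subst h
      simp [hnd.1, ih hnd.2]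
    · simp [h, ih hnd.2, Ne.symm h]

lemma pv_sum_center (L : List Int) (hnd : L.Nodup) (c : Int) (f : Int → Int) :
    (L.map (fun n => if n = c then 0 else f n)).sum
      = (L.map f).sum - (if c ∈ L then f c else 0) := by
  have h : (fun n => if n = c then (0:Int) else f n)
      = fun n => f n - (if n = c then f c else 0) := by
    funext n; by_cases h : n = c <;> simp [h]
  rw [h, pv_sum_map_sub, pv_sum_indicator L hnd c (f c)]

lemma pv_sum_split (L : List Int) (P : Int → Prop) [DecidablePred P] (f : Int → Int) (c : Int) :
    (L.map (fun n => if P n then f n else c)).sum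
      = c * ((L.length : Int) - ((L.filter (fun n => decide (P n))).length : Int))
        + ((L.filter (fun n => decide (P n))).map f).sum := by
  induction L with
  | nil => simp
  | cons a t ih =>
    by_cases h : P a <;>
      simp only [List.map_cons, List.sum_cons, List.filter_cons, h, decide_true,
        decide_false, if_pos, List.length_cons, ih] <;>
    · push_cast
      ring_nf
      try rfl

lemma pv_filter_pyRange (a b lo hi : Int) :
    (PySem.List.pyRange a b 1).filter (fun n => decide (lo ≤ n ∧ n < hi))
      = PySem.List.pyRange (max a lo) (min b hi) 1 := by
  have hs1 : ((PySem.List.pyRange a b 1).filter (fun n => decide (lo ≤ n ∧ n < hi))).Pairwise (· < ·) :=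
    (PySem.List.pairwise_lt_pyRange_one a b).filter _
  have hs2 : (PySem.List.pyRange (max a lo) (min b hi) 1).Pairwise (· < ·) :=
    PySem.List.pairwise_lt_pyRange_one _ _
  have hperm : ((PySem.List.pyRange a b 1).filter (fun n => decide (lo ≤ n ∧ n < hi))).Perm
      (PySem.List.pyRange (max a lo) (min b hi) 1) := by
    refine (List.perm_ext_iff_of_nodup (hs1.nodup) (hs2.nodup)).2 ?_
    intro n
    simp only [List.mem_filter, PySem.List.mem_pyRange_one, decide_eq_true_eq]
    omega
  exact hperm.eq_of_pairwise (fun a b _ _ h1 h2 => absurd h2 (not_lt.2 h1.le)) hs1 hs2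

lemma pv_map_shift (a b c : Int) :
    (PySem.List.pyRange a b 1).map (fun n => c + n) = PySem.List.pyRange (c + a) (c + b) 1 := by
  rw [PySem.List.pyRange_one, PySem.List.pyRange_one, List.map_map]
  have h : (c + b) - (c + a) = b - a := by ring
  rw [h]
  refine List.map_congr_left ?_
  intro k _
  simp
  ring

-- loop-to-sum and clipping lemmas specific to the two programs

lemma pv_foldl_sum (L : List Int) (F : Int → Int → Int) (t : Int → Int)
    (h : ∀ c n, F c n = c + t n) (init : Int) :
    L.foldl F init = init + (L.map t).sum := by
  induction L generalizing init with
  | nil => simp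
  | cons a tl ih =>
    rw [List.foldl_cons, ih, h]
    simp [add_assoc]

lemma pv_sum_ones (L : List Int) : (L.map (fun _ => (1:Int))).sum = (L.length : Int) := by
  induction L with
  | nil => simp
  | cons a t ih => simp; omega

lemma pv_sum_map_addconst (L : List Int) (c : Int) (g : Int → Int) :
    (L.map (fun n => c + g n)).sum = c * (L.length : Int) + (L.map g).sum := by
  induction L with
  | nil => simp
  | cons a t ih => simp [ih]; ring

lemma pv_double_center (LX LY : List Int) (hx : LX.Nodup) (hy : LY.Nodup)
    (x y : Int) (f : Int → Int → Int) :
    (LY.map (fun ny => (LX.map (fun nx => if nx = x ∧ ny = y then 0 else f nx ny)).sum)).sum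
      = (LY.map (fun ny => (LX.map (fun nx => f nx ny)).sum)).sum
        - (if y ∈ LY then (if x ∈ LX then f x y else 0) else 0) := by
  have hrow : ∀ ny, (LX.map (fun nx => if nx = x ∧ ny = y then 0 else f nx ny)).sum
      = (LX.map (fun nx => f nx ny)).sum
        - (if ny = y then (if x ∈ LX then f x y else 0) else 0) := by
    intro ny
    by_cases h : ny = y
    · subst h
      rw [List.map_congr_left (fun nx _ => if_congr (by simp) rfl rfl : ∀ nx ∈ LX,
            (if nx = x ∧ ny = ny then 0 else f nx ny) = (if nx = x then 0 else f nx ny))]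
      rw [pv_sum_center LX hx x (fun nx => f nx ny), if_pos rfl]
    · rw [List.map_congr_left (fun nx _ => if_neg (fun hc => h hc.2) : ∀ nx ∈ LX,
            (if nx = x ∧ ny = y then 0 else f nx ny) = f nx ny), if_neg h, sub_zero]
  rw [List.map_congr_left (fun ny _ => hrow ny), pv_sum_map_sub,
    pv_sum_indicator LY hy y (if x ∈ LX then f x y else 0)]

lemma pv_double_split (a b c d width height : Int) (f : Int → Int → Int) :
    ((PySem.List.pyRange c d 1).map (fun ny =>
        ((PySem.List.pyRange a b 1).map (fun nx =>
          if 0 ≤ nx ∧ nx < width ∧ 0 ≤ ny ∧ ny < height then f nx ny else 1)).sum)).sum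
      = ((b - a).toNat : Int) * (((d - c).toNat : Int)
            - ((PySem.List.pyRange (max c 0) (min d height) 1).length : Int))
        + ((PySem.List.pyRange (max c 0) (min d height) 1).length : Int)
            * (((b - a).toNat : Int)
            - ((PySem.List.pyRange (max a 0) (min b width) 1).length : Int))
        + ((PySem.List.pyRange (max c 0) (min d height) 1).map (fun ny =>
            ((PySem.List.pyRange (max a 0) (min b width) 1).map (fun nx => f nx ny)).sum)).sum := by
  have hrow : ∀ ny, ((PySem.List.pyRange a b 1).map (fun nx =>
        if 0 ≤ nx ∧ nx < width ∧ 0 ≤ ny ∧ ny < height then f nx ny else 1)).sum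
      = if 0 ≤ ny ∧ ny < height then
          (((b - a).toNat : Int) - ((PySem.List.pyRange (max a 0) (min b width) 1).length : Int))
            + ((PySem.List.pyRange (max a 0) (min b width) 1).map (fun nx => f nx ny)).sum
        else ((b - a).toNat : Int) := by
    intro ny
    by_cases hy : 0 ≤ ny ∧ ny < height
    · rw [List.map_congr_left (fun nx _ => if_congr
          ⟨fun h => ⟨h.1, h.2.1⟩, fun h => ⟨h.1, h.2, hy.1, hy.2⟩⟩ rfl rfl : ∀ nx ∈ PySem.List.pyRange a b 1,
          (if 0 ≤ nx ∧ nx < width ∧ 0 ≤ ny ∧ ny < height then f nx ny else 1)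
            = (if 0 ≤ nx ∧ nx < width then f nx ny else 1))]
      rw [pv_sum_split (PySem.List.pyRange a b 1) (fun nx => 0 ≤ nx ∧ nx < width) (fun nx => f nx ny) 1,
        pv_filter_pyRange a b 0 width, if_pos hy, PySem.List.length_pyRange_one, one_mul]
    · rw [List.map_congr_left (fun nx _ => if_neg (fun h => hy ⟨h.2.2.1, h.2.2.2⟩) : ∀ nx ∈ PySem.List.pyRange a b 1,
          (if 0 ≤ nx ∧ nx < width ∧ 0 ≤ ny ∧ ny < height then f nx ny else 1) = 1)]
      rw [pv_sum_ones, if_neg hy, PySem.List.length_pyRange_one]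
  rw [List.map_congr_left (fun ny _ => hrow ny)]
  rw [pv_sum_split (PySem.List.pyRange c d 1) (fun ny => 0 ≤ ny ∧ ny < height) _ (((b - a).toNat : Int)),
    pv_filter_pyRange c d 0 height, PySem.List.length_pyRange_one]
  rw [pv_sum_map_addconst]
  ring

def pvWall (tiles : List (Int × Int × String)) (nx ny : Int) : Int :=
  if pvGet tiles nx ny = some "wall" then 1 else 0

lemma pv_map_shift' (a b c : Int) (G : Int → Int) :
    (PySem.List.pyRange a b 1).map (fun n => G (c + n)) = (PySem.List.pyRange (c + a) (c + b) 1).map G := by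
  rw [← pv_map_shift a b c, List.map_map]
  rfl

lemma pvA_eq (tiles : List (Int × Int × String)) (x y width height radius : Int) (hr : 0 ≤ radius) :
    count_walls_around tiles x y width height radius
      = (2 * radius + 1) * ((2 * radius + 1)
            - ((PySem.List.pyRange (max (y - radius) 0) (min (y + radius + 1) height) 1).length : Int))
        + ((PySem.List.pyRange (max (y - radius) 0) (min (y + radius + 1) height) 1).length : Int)
          * ((2 * radius + 1)
            - ((PySem.List.pyRange (max (x - radius) 0) (min (x + radius + 1) width) 1).length : Int))
        + ((PySem.List.pyRange (max (y - radius) 0) (min (y + radius + 1) height) 1).map (fun ny =>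
            ((PySem.List.pyRange (max (x - radius) 0) (min (x + radius + 1) width) 1).map (fun nx =>
              pvWall tiles nx ny)).sum)).sum
        - (if 0 ≤ x ∧ x < width ∧ 0 ≤ y ∧ y < height then pvWall tiles x y else 1) := by
  have hrow : ∀ (c dy : Int),
      (PySem.List.pyRange (-radius) (radius + 1) 1).foldl (fun count dx =>
          if dx = 0 ∧ dy = 0 then count
          else
            let nx := x + dx
            let ny := y + dy
            if 0 ≤ nx ∧ nx < width ∧ 0 ≤ ny ∧ ny < height then
              if pvGet tiles nx ny = some "wall" then count + 1 else count
            else count + 1) c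
        = c + ((PySem.List.pyRange (-radius) (radius + 1) 1).map (fun dx =>
            if x + dx = x ∧ y + dy = y then 0
            else if 0 ≤ x + dx ∧ x + dx < width ∧ 0 ≤ y + dy ∧ y + dy < height then
              pvWall tiles (x + dx) (y + dy) else 1)).sum := by
    intro c dy
    refine pv_foldl_sum _ _ _ ?_ c
    intro c' dx
    simp only [pvWall]
    by_cases h1 : dx = 0 ∧ dy = 0
    · rw [if_pos h1, if_pos (by omega : x + dx = x ∧ y + dy = y)]
      ring
    · rw [if_neg h1, if_neg (by omega : ¬(x + dx = x ∧ y + dy = y))]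
      split_ifs <;> ring
  unfold count_walls_around
  rw [pv_foldl_sum _ _ _ hrow 0, zero_add]
  rw [List.map_congr_left (fun dy _ => by
    rw [pv_map_shift' (-radius) (radius + 1) x (fun nx =>
      if nx = x ∧ y + dy = y then 0
      else if 0 ≤ nx ∧ nx < width ∧ 0 ≤ y + dy ∧ y + dy < height then
        pvWall tiles nx (y + dy) else 1)] :
    ∀ dy ∈ PySem.List.pyRange (-radius) (radius + 1) 1, _ = _)]
  rw [pv_map_shift' (-radius) (radius + 1) y (fun ny =>
    ((PySem.List.pyRange (x + -radius) (x + (radius + 1)) 1).map (fun nx =>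
      if nx = x ∧ ny = y then 0
      else if 0 ≤ nx ∧ nx < width ∧ 0 ≤ ny ∧ ny < height then
        pvWall tiles nx ny else 1)).sum)]
  rw [show x + -radius = x - radius from by ring, show x + (radius + 1) = x + radius + 1 from by ring,
    show y + -radius = y - radius from by ring, show y + (radius + 1) = y + radius + 1 from by ring]
  rw [pv_double_center _ _ (PySem.List.nodup_pyRange_one _ _) (PySem.List.nodup_pyRange_one _ _) x y
    (fun nx ny => if 0 ≤ nx ∧ nx < width ∧ 0 ≤ ny ∧ ny < height then pvWall tiles nx ny else 1)]
  rw [if_pos (PySem.List.mem_pyRange_one.2 ⟨by omega, by omega⟩ : y ∈ PySem.List.pyRange (y - radius) (y + radius + 1) 1),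
    if_pos (PySem.List.mem_pyRange_one.2 ⟨by omega, by omega⟩ : x ∈ PySem.List.pyRange (x - radius) (x + radius + 1) 1)]
  rw [pv_double_split (x - radius) (x + radius + 1) (y - radius) (y + radius + 1) width height
    (fun nx ny => pvWall tiles nx ny)]
  rw [show ((x + radius + 1 - (x - radius)).toNat : Int) = 2 * radius + 1 from by omega,
    show ((y + radius + 1 - (y - radius)).toNat : Int) = 2 * radius + 1 from by omega]

lemma pvB_eq (tiles : List (Int × Int × String)) (x y width height radius : Int) (hr : ¬ radius < 0) :
    count_walls_around_alt tiles x y width height radius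
      = (2 * radius + 1) ^ 2
        - ((PySem.List.pyRange (max (x - radius) 0) (min (x + radius + 1) width) 1).length : Int)
          * ((PySem.List.pyRange (max (y - radius) 0) (min (y + radius + 1) height) 1).length : Int)
        - (if 0 ≤ x ∧ x < width ∧ 0 ≤ y ∧ y < height then 0 else 1)
        + ((PySem.List.pyRange (max (y - radius) 0) (min (y + radius + 1) height) 1).map (fun ny =>
            ((PySem.List.pyRange (max (x - radius) 0) (min (x + radius + 1) width) 1).map (fun nx =>
              pvWall tiles nx ny)).sum)).sum
        - (if 0 ≤ x ∧ x < width ∧ 0 ≤ y ∧ y < height then pvWall tiles x y else 0) := by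
  have hrow : ∀ (c ny : Int),
      (PySem.List.pyRange (max 0 (x - radius)) (min (width - 1) (x + radius) + 1) 1).foldl (fun count nx =>
          if nx = x ∧ ny = y then count
          else if pvGet tiles nx ny = some "wall" then count + 1 else count) c
        = c + ((PySem.List.pyRange (max 0 (x - radius)) (min (width - 1) (x + radius) + 1) 1).map (fun nx =>
            if nx = x ∧ ny = y then 0 else pvWall tiles nx ny)).sum := by
    intro c ny
    refine pv_foldl_sum _ _ _ ?_ c
    intro c' nx
    simp only [pvWall]
    split_ifs <;> ring
  unfold count_walls_around_alt
  rw [if_neg hr]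
  simp only [hrow]
  rw [pv_foldl_sum _ _ (fun ny =>
      ((PySem.List.pyRange (max 0 (x - radius)) (min (width - 1) (x + radius) + 1) 1).map (fun nx =>
        if nx = x ∧ ny = y then 0 else pvWall tiles nx ny)).sum) (fun c ny => rfl) _]
  rw [show max 0 (x - radius) = max (x - radius) 0 from by omega,
    show min (width - 1) (x + radius) + 1 = min (x + radius + 1) width from by omega,
    show max 0 (y - radius) = max (y - radius) 0 from by omega,
    show min (height - 1) (y + radius) + 1 = min (y + radius + 1) height from by omega]
  rw [pv_double_center _ _ (PySem.List.nodup_pyRange_one _ _) (PySem.List.nodup_pyRange_one _ _) x y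
    (fun nx ny => pvWall tiles nx ny)]
  have hmy : (y ∈ PySem.List.pyRange (max (y - radius) 0) (min (y + radius + 1) height) 1)
      = (0 ≤ y ∧ y < height) := by
    rw [PySem.List.mem_pyRange_one]
    apply propext
    omega
  have hmx : (x ∈ PySem.List.pyRange (max (x - radius) 0) (min (x + radius + 1) width) 1)
      = (0 ≤ x ∧ x < width) := by
    rw [PySem.List.mem_pyRange_one]
    apply propext
    omega
  simp only [hmy, hmx]
  rw [show max 0 (min (width - 1) (x + radius) - max (x - radius) 0 + 1)
      = ((PySem.List.pyRange (max (x - radius) 0) (min (x + radius + 1) width) 1).length : Int) from by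
    rw [PySem.List.length_pyRange_one]; omega]
  rw [show max 0 (min (height - 1) (y + radius) - max (y - radius) 0 + 1)
      = ((PySem.List.pyRange (max (y - radius) 0) (min (y + radius + 1) height) 1).length : Int) from by
    rw [PySem.List.length_pyRange_one]; omega]
  by_cases hin : 0 ≤ x ∧ x < width ∧ 0 ≤ y ∧ y < height
  · rw [if_neg (by tauto), if_pos ⟨hin.2.2.1, hin.2.2.2⟩, if_pos ⟨hin.1, hin.2.1⟩,
      if_pos hin, if_pos hin]
    ring
  · rw [if_pos (by tauto), if_neg hin, if_neg hin]
    have : ¬(0 ≤ y ∧ y < height) ∨ ¬(0 ≤ x ∧ x < width) := by tauto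
    rcases this with h | h
    · rw [if_neg h]
      ring
    · by_cases hy2 : 0 ≤ y ∧ y < height
      · rw [if_pos hy2, if_neg h]
        ring
      · rw [if_neg hy2]
        ring

-- ===== VERDICT (by name: the statement is the Claim_ definition above) =====
theorem count_walls_around_spec : Claim_equal_count_walls_around := by
  intro tiles x y width height radius _
  unfold Spec_count_walls_around
  by_cases hr : radius < 0
  · unfold count_walls_around count_walls_around_alt
    rw [PySem.List.pyRange_one_eq_nil (by omega : radius + 1 ≤ -radius), if_pos hr]
    rfl
  · rw [pvA_eq tiles x y width height radius (by omega), pvB_eq tiles x y width height radius hr]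
    by_cases hin : 0 ≤ x ∧ x < width ∧ 0 ≤ y ∧ y < height
    · simp only [if_pos hin]
      ring
    · simp only [if_neg hin]
      ring
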